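-- pv_equiv track=rewrite | github.com/AntoineZak7/GMCHIISTATS | Stats_test_2.22.py | num_gmcs
-- ===== SOURCE A (Python) =====
-- def num_gmcs(idovergmc):
--     ids = idovergmc
--     n_gmcs = 0
--     for i in range(len(ids)):
--
--         if not isinstance(ids[0], list):
--             ids = [id.tolist() for id in ids]
--         id = [ids[i].count(x) for x in ids[i]]
--         n_gmcs += len(id) - sum([x-1 for x in id])
--
--     n_gmcs = int(n_gmcs)
--     return n_gmcs
-- ===== SOURCE B (Python) =====
-- def num_gmcs(idovergmc):
--     total = 0
--     for row in idovergmc: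
--         s = sorted(row)
--         i = 0
--         while i < len(s):
--             j = i
--             while j < len(s) and s[j] == s[i]:
--                 j += 1
--             k = j - i
--             total += k * (2 - k)
--             i = j
--     return total
-- ===== Notes on version B (the rewrite author's own statement) =====
-- stated objective: faster
-- what changed: Per row, replaces the per-element .count scan (quadratic in row length) with one sort followed by a single run-length pass adding k*(2-k) per group of equal values.
import Mathlib
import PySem

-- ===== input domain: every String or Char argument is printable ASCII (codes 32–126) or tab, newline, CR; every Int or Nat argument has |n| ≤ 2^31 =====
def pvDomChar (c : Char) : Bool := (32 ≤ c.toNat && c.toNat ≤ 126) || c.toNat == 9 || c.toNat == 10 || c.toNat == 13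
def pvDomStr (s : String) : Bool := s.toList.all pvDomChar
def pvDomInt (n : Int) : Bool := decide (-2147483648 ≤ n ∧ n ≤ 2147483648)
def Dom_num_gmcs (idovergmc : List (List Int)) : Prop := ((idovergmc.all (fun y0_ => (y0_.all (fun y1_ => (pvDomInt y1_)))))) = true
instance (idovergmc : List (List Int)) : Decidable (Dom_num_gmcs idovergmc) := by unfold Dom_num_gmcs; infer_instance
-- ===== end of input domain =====

-- B replaces A's per-element .count scan of each row by one sort plus a single run-length
-- pass adding k*(2-k) per group of k equal ids (objective: faster).

-- ===== PORT A =====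
-- For input of type List (List Int), `isinstance(ids[0], list)` is true whenever the loop
-- body runs, so the `.tolist()` branch is dead code and `ids` stays `idovergmc`.
def num_gmcs (idovergmc : List (List Int)) : Int :=
  let ids := idovergmc
  let n_gmcs : Int :=
    ids.foldl (fun n_gmcs row =>
      let id := row.map (fun x => ((PySem.List.count row x : Nat) : Int))
      n_gmcs + ((row.length : Int) - (id.map (fun x => x - 1)).sum)) 0
  n_gmcs

-- ===== PORT B =====
-- the inner while loops of Source B: one pass over the sorted row, k = length of the current
-- run of equal values, adding k*(2-k) per run
def pvRuns : List Int → Int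
  | [] => 0
  | x :: xs =>
    let k : Int := 1 + ((xs.takeWhile (fun y => y == x)).length : Int)
    k * (2 - k) + pvRuns (xs.dropWhile (fun y => y == x))
termination_by l => l.length
decreasing_by
  simpa using Nat.lt_succ_of_le (List.length_dropWhile_le (fun y => y == x) xs)

def num_gmcs_alt (idovergmc : List (List Int)) : Int :=
  idovergmc.foldl (fun total row => total + pvRuns (PySem.List.sorted row (fun x => x))) 0

-- ===== PRECONDITION & SPEC =====
def Spec_num_gmcs (idovergmc : List (List Int)) (out : Int) : Prop := out = num_gmcs_alt idovergmc
instance (idovergmc : List (List Int)) (out : Int) : Decidable (Spec_num_gmcs idovergmc out) := by unfold Spec_num_gmcs; infer_instance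

-- ===== CLAIM (what is proved, stated in full; the proofs are below) =====
def Claim_equal_num_gmcs : Prop := ∀ (idovergmc : List (List Int)), Dom_num_gmcs idovergmc → Spec_num_gmcs idovergmc (num_gmcs idovergmc)

-- ===== LEMMAS AND PROOFS =====

-- per-row value both sides compute, written as a sum over the row's elements
def pvF (l : List Int) : Int := (l.map (fun x => 2 - (l.count x : Int))).sum

lemma pvF_perm {l l' : List Int} (h : l.Perm l') : pvF l = pvF l' := by
  unfold pvF
  have hc : (fun x => (2 : Int) - (l.count x : Int)) = fun x => 2 - (l'.count x : Int) :=
    funext fun x => by rw [h.count_eq]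
  rw [hc]
  exact (h.map _).sum_eq

lemma rowA_aux (l : List Int) (f : Int → Int) :
    (l.length : Int) - (l.map (fun x => f x - 1)).sum = (l.map (fun x => 2 - f x)).sum := by
  induction l with
  | nil => simp
  | cons a l ih =>
    simp only [List.map_cons, List.sum_cons, List.length_cons]
    push_cast
    omega

lemma rowA (row : List Int) :
    (row.length : Int) - ((row.map (fun x => ((PySem.List.count row x : Nat) : Int))).map
      (fun x => x - 1)).sum = pvF row := by
  rw [List.map_map]
  simpa [PySem.List.count_eq, pvF, Function.comp] using
    rowA_aux row (fun x => ((row.count x : Nat) : Int))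

lemma runs_eq : ∀ (s : List Int), s.Pairwise (· ≤ ·) → pvRuns s = pvF s := by
  intro s
  induction s using pvRuns.induct with
  | case1 => intro _; rw [pvRuns]; rfl
  | case2 x xs ih =>
    intro hs
    set t := xs.takeWhile (fun y => y == x) with ht
    set d := xs.dropWhile (fun y => y == x) with hd
    have hsplit : t ++ d = xs := List.takeWhile_append_dropWhile
    have hx : ∀ y ∈ xs, x ≤ y := fun y hy => List.rel_of_pairwise_cons hs hy
    have hxs : xs.Pairwise (· ≤ ·) := (List.pairwise_cons.mp hs).2
    have hdsub : d.Sublist xs := List.dropWhile_sublist _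
    have hdp : d.Pairwise (· ≤ ·) := hxs.sublist hdsub
    have htall : ∀ y ∈ t, y = x := by
      intro y hy
      rw [ht] at hy
      have h := List.mem_takeWhile_imp hy
      beta_reduce at h
      exact eq_of_beq h
    -- every element of d is strictly greater than x
    have hdgt : ∀ z ∈ d, x < z := by
      intro z hz
      cases hdd : d with
      | nil => simp [hdd] at hz
      | cons y d' =>
        have hy_ne : ¬ (y == x) = true := by
          have h0 := List.head?_dropWhile_not (fun y => y == x) xs
          rw [← hd, hdd] at h0
          simpa using h0
        have hy_mem : y ∈ xs := hdsub.subset (by simp [hdd])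
        have hyx : y ≠ x := fun h => hy_ne (beq_iff_eq.mpr h)
        have hxy : x < y := lt_of_le_of_ne (hx y hy_mem) (Ne.symm hyx)
        rw [hdd] at hz
        rcases List.mem_cons.mp hz with rfl | hz'
        · exact hxy
        · have : y ≤ z := List.rel_of_pairwise_cons (hdd ▸ hdp) hz'
          omega
    have hdne : ∀ z ∈ d, z ≠ x := fun z hz => (hdgt z hz).ne'
    have hxd : x ∉ d := fun h => (hdgt x h).false
    -- counts in x :: xs = x :: (t ++ d)
    have hct : t.count x = t.length := List.count_eq_length.mpr (fun b hb => (htall b hb).symm)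
    have hcd : d.count x = 0 := List.count_eq_zero.mpr hxd
    have hk : (((x :: xs).count x : Nat) : Int) = 1 + (t.length : Int) := by
      rw [← hsplit]
      simp [List.count_append, hct, hcd]
      ring
    have hcz : ∀ z ∈ d, (x :: xs).count z = d.count z := by
      intro z hz
      rw [← hsplit]
      have hzt : t.count z = 0 := List.count_eq_zero.mpr (fun hmem => hdne z hz (htall z hmem))
      simp [List.count_append, hzt, Ne.symm (hdne z hz)]
    -- sum of any g over x :: xs splits into the run of x and the rest
    have key : ∀ (g : Int → Int), (∀ y ∈ t, g y = g x) →
        (∀ z ∈ d, g z = 2 - ((d.count z : Nat) : Int)) →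
        ((x :: xs).map g).sum = g x + (t.length : Int) * g x + pvF d := by
      intro g h1 h2
      rw [← hsplit, List.map_cons, List.map_append, List.sum_cons, List.sum_append,
          List.map_congr_left h1, List.map_congr_left h2, List.map_const', List.sum_replicate,
          nsmul_eq_mul]
      unfold pvF
      ring
    have hpf : pvF (x :: xs) = (2 - (((x :: xs).count x : Nat) : Int))
        + (t.length : Int) * (2 - (((x :: xs).count x : Nat) : Int)) + pvF d :=
      key (fun z => 2 - (((x :: xs).count z : Nat) : Int))
        (fun y hy => by beta_reduce; rw [htall y hy]) (fun z hz => by beta_reduce; rw [hcz z hz])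
    rw [pvRuns, ih hdp, hpf, hk]
    ring

lemma rowB (row : List Int) : pvRuns (PySem.List.sorted row (fun x => x)) = pvF row := by
  rw [runs_eq _ (by simpa using PySem.List.sorted_pairwise row (fun x => x))]
  exact pvF_perm (PySem.List.sorted_perm row (fun x => x) false)

lemma fold_eq : ∀ (l : List (List Int)) (a : Int),
    l.foldl (fun n_gmcs row =>
      let id := row.map (fun x => ((PySem.List.count row x : Nat) : Int))
      n_gmcs + ((row.length : Int) - (id.map (fun x => x - 1)).sum)) a
    = l.foldl (fun total row => total + pvRuns (PySem.List.sorted row (fun x => x))) a := by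
  intro l
  induction l with
  | nil => intro a; rfl
  | cons r l ih =>
    intro a
    simp only [List.foldl_cons]
    rw [ih, rowA r, rowB r]

-- ===== VERDICT (by name: the statement is the Claim_ definition above) =====
theorem num_gmcs_spec : Claim_equal_num_gmcs := by
  intro idovergmc _
  unfold Spec_num_gmcs num_gmcs num_gmcs_alt
  exact fold_eq idovergmc 0
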